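-- pv_equiv track=rewrite | github.com/linkml/linkml | tests/test_compliance/helper.py | generate_tree_nodes
-- ===== SOURCE A (Python) =====
-- from typing import Any, Callable, Dict, Iterator, List, Optional, Set, Tuple, Type, Union
--
-- TREE_NODE = Tuple[int]
--
-- def generate_tree_nodes(depth=3, num_siblings=2, path: List[int] = None) -> Iterator[TREE_NODE]:
--     """
--     Generate a tree of data names, with depth `depth`.
--
--     :param depth:
--     :return:
--     """
--     assert depth >= 0
--     if path is None:
--         path = [0]
--     yield tuple(path)
--     for i in range(1, num_siblings + 1):
--         if depth > 0:
--             yield from generate_tree_nodes(depth=depth - 1, num_siblings=num_siblings, path=path + [i])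
-- ===== SOURCE B (Python) =====
-- def generate_tree_nodes(depth=3, num_siblings=2, path=None):
--     """Iterative pre-order enumeration of the complete tree via an explicit stack."""
--     assert depth >= 0
--     stack = [(depth, [0] if path is None else list(path))]
--     while stack:
--         d, p = stack.pop()
--         yield tuple(p)
--         if d > 0:
--             for i in range(num_siblings, 0, -1):
--                 stack.append((d - 1, p + [i]))
-- ===== Notes on version B (the rewrite author's own statement) =====
-- stated objective: alternative
-- what changed: Replaced the recursive generator with an iterative explicit-stack traversal that pushes child frames in reverse so they pop in pre-order.
import Mathlib
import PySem

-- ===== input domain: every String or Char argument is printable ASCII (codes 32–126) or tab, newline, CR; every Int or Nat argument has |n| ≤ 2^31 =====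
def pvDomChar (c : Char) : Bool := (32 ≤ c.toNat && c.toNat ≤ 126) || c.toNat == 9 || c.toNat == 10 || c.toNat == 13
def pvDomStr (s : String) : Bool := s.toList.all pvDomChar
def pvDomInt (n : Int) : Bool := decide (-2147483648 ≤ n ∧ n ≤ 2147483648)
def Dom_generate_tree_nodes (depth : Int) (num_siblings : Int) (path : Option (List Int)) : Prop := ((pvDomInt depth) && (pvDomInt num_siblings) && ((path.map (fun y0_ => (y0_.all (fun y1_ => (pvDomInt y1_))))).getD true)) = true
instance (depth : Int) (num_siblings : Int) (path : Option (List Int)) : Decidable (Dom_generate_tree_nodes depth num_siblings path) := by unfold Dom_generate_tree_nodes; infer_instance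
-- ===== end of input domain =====

-- B replaces the recursive generator with an explicit-stack iterative traversal
-- (same pre-order sequence, alternative decomposition; return values are collected as a list).

-- ===== PORT A =====
-- A recurses with depth-1 under `assert depth >= 0`; the recursion depth is depth.toNat,
-- used as the structural argument (the `if depth > 0` branch is the successor case).
def genA (ns : Int) : Nat → List Int → List (List Int)
  | 0, p => p :: (PySem.List.pyRange 1 (ns + 1) 1).flatMap (fun _ => ([] : List (List Int)))
  | d + 1, p => p :: (PySem.List.pyRange 1 (ns + 1) 1).flatMap (fun i => genA ns d (p ++ [i]))

def generate_tree_nodes (depth : Int) (num_siblings : Int) (path : Option (List Int)) : List (List Int) :=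
  if 0 ≤ depth then genA num_siblings depth.toNat (path.getD [0]) else []

-- ===== PORT B =====
-- weight of a frame of remaining depth d (number of nodes under it), used for termination
def wB (m : Nat) : Nat → Nat
  | 0 => 1
  | d + 1 => 1 + m * wB m d

def stackW (m : Nat) (st : List (Nat × List Int)) : Nat := (st.map (fun f => wB m f.1)).sum

theorem stackW_cons (m : Nat) (d : Nat) (p : List Int) (rest : List (Nat × List Int)) :
    stackW m ((d, p) :: rest) = wB m d + stackW m rest := by
  simp [stackW]

theorem stackW_push (m d' : Nat) (f : Int → List Int) (l : List Int)
    (rest : List (Nat × List Int)) :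
    stackW m (l.foldl (fun acc i => (d', f i) :: acc) rest)
      = l.length * wB m d' + stackW m rest := by
  rw [List.foldl_flip_cons_eq_append]
  simp [stackW, Function.comp_def]

-- the while-stack loop of B: pop a frame, emit its path, push the children in reverse
def runB (ns : Int) (st : List (Nat × List Int)) : List (List Int) :=
  match st with
  | [] => []
  | (d, p) :: rest =>
    p :: runB ns (match d with
      | 0 => rest
      | Nat.succ d' => (PySem.List.pyRange ns 0 (-1)).foldl (fun acc i => (d', p ++ [i]) :: acc) rest)
termination_by stackW (PySem.List.pyRange ns 0 (-1)).length st
decreasing_by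
  cases d with
  | zero => rw [stackW_cons]; simp only [wB]; omega
  | succ d' =>
    simp only []
    rw [stackW_push, stackW_cons]
    simp only [wB]
    omega

def generate_tree_nodes_alt (depth : Int) (num_siblings : Int) (path : Option (List Int)) : List (List Int) :=
  if 0 ≤ depth then runB num_siblings [(depth.toNat, path.getD [0])] else []

-- ===== PRECONDITION & SPEC =====
-- Pre_ excludes depth < 0, where the Python A raises AssertionError (and B does too).
def Pre_generate_tree_nodes (depth : Int) (num_siblings : Int) (path : Option (List Int)) : Prop := 0 ≤ depth
instance (depth : Int) (num_siblings : Int) (path : Option (List Int)) : Decidable (Pre_generate_tree_nodes depth num_siblings path) := by unfold Pre_generate_tree_nodes; infer_instance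

def pvWitness_generate_tree_nodes : Int × Int × Option (List Int) := (2, 2, none)

def Spec_generate_tree_nodes (depth : Int) (num_siblings : Int) (path : Option (List Int)) (out : List (List Int)) : Prop := out = generate_tree_nodes_alt depth num_siblings path
instance (depth : Int) (num_siblings : Int) (path : Option (List Int)) (out : List (List Int)) : Decidable (Spec_generate_tree_nodes depth num_siblings path out) := by unfold Spec_generate_tree_nodes; infer_instance

-- ===== CLAIM (what is proved, stated in full; the proofs are below) =====
def Claim_equal_generate_tree_nodes : Prop := ∀ (depth : Int) (num_siblings : Int) (path : Option (List Int)), Dom_generate_tree_nodes depth num_siblings path → Pre_generate_tree_nodes depth num_siblings path → Spec_generate_tree_nodes depth num_siblings path (generate_tree_nodes depth num_siblings path)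

-- ===== LEMMAS AND PROOFS =====

theorem runB_cons (ns : Int) : ∀ (d : Nat) (p : List Int) (rest : List (Nat × List Int)),
    runB ns ((d, p) :: rest) = genA ns d p ++ runB ns rest := by
  intro d
  induction d with
  | zero =>
    intro p rest
    rw [runB, genA]
    simp
  | succ d' ih =>
    intro p rest
    rw [runB, genA]
    rw [List.foldl_flip_cons_eq_append]
    rw [show (PySem.List.pyRange ns 0 (-1)) = (PySem.List.pyRange 1 (ns + 1) 1).reverse from by
      simpa using PySem.List.pyRange_neg_one_eq_reverse ns 0]
    rw [List.map_reverse, List.reverse_reverse]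
    simp only [List.cons_append]
    congr 1
    -- now: runB ns (map ++ rest) = flatMap ++ runB ns rest, by induction on the range list
    generalize (PySem.List.pyRange 1 (ns + 1) 1) = l
    induction l generalizing rest with
    | nil => simp
    | cons i l ihl =>
      simp only [List.map_cons, List.cons_append, List.flatMap_cons]
      rw [ih, ihl, List.append_assoc]

theorem generate_tree_nodes_spec : Claim_equal_generate_tree_nodes := by
  intro depth ns path _ hpre
  unfold Spec_generate_tree_nodes generate_tree_nodes generate_tree_nodes_alt
  have hpre' : 0 ≤ depth := hpre
  rw [if_pos hpre', if_pos hpre']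
  rw [runB_cons]
  rw [runB]
  simp
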